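-- pv_equiv track=rewrite | github.com/Naateri/Compiladores | Labs/8/lab_8.py | split_multi_suma
-- ===== SOURCE A (Python) =====
-- def split_multi_suma(tokens):
--     multi = list() # T
--     suma = list() # Ep
--
--     append_multi = True
--
--     for token in tokens:
--         if token == '+' or token == '-':
--             append_multi = False
--
--         if append_multi:
--             multi.append(token)
--         else:
--             suma.append(token)
--
--     return multi, suma
-- ===== SOURCE B (Python) =====
-- def split_multi_suma(tokens):
--     tokens = list(tokens)
--     idx = next((i for i, t in enumerate(tokens) if t == '+' or t == '-'), len(tokens))
--     return tokens[:idx], tokens[idx:]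
-- ===== Notes on version B (the rewrite author's own statement) =====
-- stated objective: simpler
-- what changed: Replaces the flag-driven element-by-element append loop with finding the index of the first '+'/'-' and returning two slices.
import Mathlib
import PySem

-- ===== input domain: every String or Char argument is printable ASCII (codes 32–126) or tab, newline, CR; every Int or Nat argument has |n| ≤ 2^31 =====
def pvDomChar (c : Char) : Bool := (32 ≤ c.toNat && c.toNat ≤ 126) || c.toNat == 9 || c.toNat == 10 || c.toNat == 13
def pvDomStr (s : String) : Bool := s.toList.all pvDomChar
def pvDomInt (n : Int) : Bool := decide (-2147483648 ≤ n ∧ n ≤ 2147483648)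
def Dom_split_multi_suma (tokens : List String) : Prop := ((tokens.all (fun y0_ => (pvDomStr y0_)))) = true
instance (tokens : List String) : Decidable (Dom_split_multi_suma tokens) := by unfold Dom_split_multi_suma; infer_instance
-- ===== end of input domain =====

-- B finds the index of the first '+'/'-' and returns two slices instead of A's flag-driven append loop (objective: simpler).

-- ===== PORT A =====
-- the for-loop over tokens with state (multi, suma, append_multi)
def splitLoopA (tokens multi suma : List String) (append_multi : Bool) : List String × List String :=
  match tokens with
  | [] => (multi, suma)
  | token :: rest =>
    let am := if token == "+" || token == "-" then false else append_multi
    if am then splitLoopA rest (multi ++ [token]) suma am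
    else splitLoopA rest multi (suma ++ [token]) am

def split_multi_suma (tokens : List String) : List String × List String :=
  splitLoopA tokens [] [] true

-- ===== PORT B =====
def split_multi_suma_alt (tokens : List String) : List String × List String :=
  let idx := tokens.findIdx (fun t => t == "+" || t == "-")
  (tokens.take idx, tokens.drop idx)

-- ===== PRECONDITION & SPEC =====
def Spec_split_multi_suma (tokens : List String) (out : List String × List String) : Prop := out = split_multi_suma_alt tokens
instance (tokens : List String) (out : List String × List String) : Decidable (Spec_split_multi_suma tokens out) := by unfold Spec_split_multi_suma; infer_instance

-- ===== CLAIM (what is proved, stated in full; the proofs are below) =====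
def Claim_equal_split_multi_suma : Prop := ∀ (tokens : List String), Dom_split_multi_suma tokens → Spec_split_multi_suma tokens (split_multi_suma tokens)

-- ===== LEMMAS AND PROOFS =====

-- once the flag is false, everything left goes to suma
theorem splitLoopA_false (tokens : List String) : ∀ (multi suma : List String),
    splitLoopA tokens multi suma false = (multi, suma ++ tokens) := by
  induction tokens with
  | nil => intro m s; simp [splitLoopA]
  | cons t rest ih =>
    intro m s
    simp only [splitLoopA]
    split <;> simp_all

-- while the flag is true, the loop appends the prefix before the first '+'/'-' to multi and the rest to suma
theorem splitLoopA_true (tokens : List String) : ∀ (multi suma : List String),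
    splitLoopA tokens multi suma true =
      (multi ++ tokens.take (tokens.findIdx (fun t => t == "+" || t == "-")),
       suma ++ tokens.drop (tokens.findIdx (fun t => t == "+" || t == "-"))) := by
  induction tokens with
  | nil => intro m s; simp [splitLoopA]
  | cons t rest ih =>
    intro m s
    by_cases h : (t == "+" || t == "-") = true
    · simp [splitLoopA, h, splitLoopA_false, List.findIdx_cons]
    · simp [splitLoopA, h, ih, List.findIdx_cons]

-- ===== VERDICT (by name: the statement is the Claim_ definition above) =====
theorem split_multi_suma_spec : Claim_equal_split_multi_suma := by
  intro tokens _
  unfold Spec_split_multi_suma split_multi_suma split_multi_suma_alt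
  simp [splitLoopA_true]
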